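-- pv_equiv track=rewrite | github.com/charlesAndreu/CubiCasa5k | build_training_csv.py | build_fieldnames
-- ===== SOURCE A (Python) =====
-- def build_fieldnames(existing_fieldnames, existing_rows, new_rows, new_keys):
--     required_first = ["folder_name", "name"]
--
--     ordered_keys = []
--     for key in existing_fieldnames:
--         if key not in ordered_keys:
--             ordered_keys.append(key)
--
--     if not ordered_keys:
--         seen = set(required_first)
--         for row in existing_rows + new_rows:
--             for key in row.keys():
--                 if key in seen:
--                     continue
--                 seen.add(key)
--                 ordered_keys.append(key)
--     else:
--         for key in new_keys:
--             if key not in ordered_keys and key not in required_first: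
--                 ordered_keys.append(key)
--
--     for key in reversed(required_first):
--         if key in ordered_keys:
--             ordered_keys.remove(key)
--         ordered_keys.insert(0, key)
--
--     return ordered_keys
-- ===== SOURCE B (Python) =====
-- def build_fieldnames(existing_fieldnames, existing_rows, new_rows, new_keys):
--     # One ordered-dedup via dict.fromkeys over a prefixed candidate stream;
--     # no membership loops and no final reordering pass.
--     required_first = ["folder_name", "name"]
--     if existing_fieldnames:
--         candidates = list(existing_fieldnames) + list(new_keys)
--     else:
--         candidates = [key for row in existing_rows + new_rows for key in row]
--     return list(dict.fromkeys(required_first + candidates))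
-- ===== Notes on version B (the rewrite author's own statement) =====
-- stated objective: faster
-- what changed: B builds one prefixed candidate stream and deduplicates it with a single ordered dict.fromkeys call (hash-based, O(n)), replacing A's three staged passes with linear list-membership scans (pre-dedup of existing_fieldnames, guarded appends, and the final reversed remove/insert reordering).
import Mathlib
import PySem

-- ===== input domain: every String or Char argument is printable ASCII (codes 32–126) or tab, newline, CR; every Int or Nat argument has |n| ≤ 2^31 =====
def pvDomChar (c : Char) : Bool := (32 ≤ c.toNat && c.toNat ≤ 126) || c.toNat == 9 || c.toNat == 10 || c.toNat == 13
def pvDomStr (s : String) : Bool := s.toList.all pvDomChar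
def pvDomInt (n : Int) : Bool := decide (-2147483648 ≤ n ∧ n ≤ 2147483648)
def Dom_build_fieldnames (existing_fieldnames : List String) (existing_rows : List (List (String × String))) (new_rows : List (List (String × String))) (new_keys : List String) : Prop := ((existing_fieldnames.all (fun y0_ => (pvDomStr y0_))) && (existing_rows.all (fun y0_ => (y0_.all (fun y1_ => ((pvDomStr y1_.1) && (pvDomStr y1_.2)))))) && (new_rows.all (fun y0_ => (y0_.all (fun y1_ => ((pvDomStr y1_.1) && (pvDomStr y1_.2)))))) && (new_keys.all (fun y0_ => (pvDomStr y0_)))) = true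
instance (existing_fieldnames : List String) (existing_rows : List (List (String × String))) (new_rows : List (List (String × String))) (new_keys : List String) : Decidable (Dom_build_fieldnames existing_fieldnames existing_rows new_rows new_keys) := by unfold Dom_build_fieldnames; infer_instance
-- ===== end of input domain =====

-- B deduplicates one prefixed candidate stream with a single ordered dict.fromkeys,
-- replacing A's staged quadratic membership loops and final reordering pass (objective: faster, measured).

-- ===== PORT A =====
-- row.keys() of a dict given as an association list: the distinct keys in first-insertion order.
def build_fieldnames (existing_fieldnames : List String) (existing_rows : List (List (String × String))) (new_rows : List (List (String × String))) (new_keys : List String) : List String :=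
  let required_first : List String := ["folder_name", "name"]
  let ordered_keys : List String :=
    existing_fieldnames.foldl (fun acc key => if key ∈ acc then acc else acc ++ [key]) []
  let ordered_keys : List String :=
    if ordered_keys = [] then
      ((existing_rows ++ new_rows).foldl
        (fun (st : PySem.Set String × List String) row =>
          (PySem.Set.ofList (row.map Prod.fst)).foldl
            (fun (st : PySem.Set String × List String) key =>
              if key ∈ st.1 then st
              else (PySem.Set.add st.1 key, st.2 ++ [key]))
            st)
        (PySem.Set.ofList required_first, ordered_keys)).2
    else
      new_keys.foldl
        (fun acc key => if key ∉ acc ∧ key ∉ required_first then acc ++ [key] else acc)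
        ordered_keys
  required_first.reverse.foldl
    (fun acc key =>
      -- list.remove inside the "key in ordered_keys" guard removes the first occurrence: List.erase (exact here)
      let acc := if key ∈ acc then acc.erase key else acc
      PySem.List.insert acc 0 key)
    ordered_keys

-- ===== PORT B =====
-- list(dict.fromkeys(xs)): fold the keys into an insertion-ordered PySem.Dict, take its keys.
def build_fieldnames_alt (existing_fieldnames : List String) (existing_rows : List (List (String × String))) (new_rows : List (List (String × String))) (new_keys : List String) : List String :=
  let required_first : List String := ["folder_name", "name"]
  let candidates : List String :=
    if existing_fieldnames ≠ [] then existing_fieldnames ++ new_keys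
    else (existing_rows ++ new_rows).flatMap
      (fun row => (PySem.Set.ofList (row.map Prod.fst) : List String))
  PySem.Dict.keys
    ((required_first ++ candidates).foldl
      (fun d key => PySem.Dict.insert d key ()) PySem.Dict.empty)

-- ===== PRECONDITION & SPEC =====
def Spec_build_fieldnames (existing_fieldnames : List String) (existing_rows : List (List (String × String))) (new_rows : List (List (String × String))) (new_keys : List String) (out : List String) : Prop := out = build_fieldnames_alt existing_fieldnames existing_rows new_rows new_keys
instance (existing_fieldnames : List String) (existing_rows : List (List (String × String))) (new_rows : List (List (String × String))) (new_keys : List String) (out : List String) : Decidable (Spec_build_fieldnames existing_fieldnames existing_rows new_rows new_keys out) := by unfold Spec_build_fieldnames; infer_instance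

-- ===== CLAIM (what is proved, stated in full; the proofs are below) =====
def Claim_equal_build_fieldnames : Prop := ∀ (existing_fieldnames : List String) (existing_rows : List (List (String × String))) (new_rows : List (List (String × String))) (new_keys : List String), Dom_build_fieldnames existing_fieldnames existing_rows new_rows new_keys → Spec_build_fieldnames existing_fieldnames existing_rows new_rows new_keys (build_fieldnames existing_fieldnames existing_rows new_rows new_keys)

-- ===== LEMMAS AND PROOFS =====

-- pvDD s ks: the keys of ks not in s, first occurrences, in order ("dedup against seen-list s").
def pvDD (s : List String) : List String → List String
  | [] => []
  | k :: ks => if k ∈ s then pvDD s ks else k :: pvDD (s ++ [k]) ks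

theorem pvDD_congr {s t : List String} (ks : List String) (h : ∀ x, x ∈ s ↔ x ∈ t) :
    pvDD s ks = pvDD t ks := by
  induction ks generalizing s t with
  | nil => rfl
  | cons k ks ih =>
    simp only [pvDD]
    by_cases hk : k ∈ s
    · rw [if_pos hk, if_pos ((h k).1 hk), ih h]
    · rw [if_neg hk, if_neg (fun c => hk ((h k).2 c))]
      exact congrArg _ (ih (fun x => by simp only [List.mem_append, h x]))

theorem pvDD_mem {x : String} {s ks : List String} : x ∈ pvDD s ks ↔ x ∈ ks ∧ x ∉ s := by
  induction ks generalizing s with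
  | nil => simp [pvDD]
  | cons k ks ih =>
    simp only [pvDD]
    by_cases hk : k ∈ s
    · rw [if_pos hk, ih]
      constructor
      · rintro ⟨hx, hxs⟩; exact ⟨List.mem_cons_of_mem _ hx, hxs⟩
      · rintro ⟨hx, hxs⟩
        rcases List.mem_cons.1 hx with rfl | hx
        · exact absurd hk hxs
        · exact ⟨hx, hxs⟩
    · rw [if_neg hk]
      simp only [List.mem_cons, ih, List.mem_append, List.not_mem_nil, or_false]
      constructor
      · rintro (rfl | ⟨hx, hxs⟩)
        · exact ⟨Or.inl rfl, hk⟩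
        · exact ⟨Or.inr hx, fun c => hxs (Or.inl c)⟩
      · rintro ⟨rfl | hx, hxs⟩
        · exact Or.inl rfl
        · by_cases hxk : x = k
          · exact Or.inl hxk
          · exact Or.inr ⟨hx, fun c => by rcases c with c | c; exact hxs c; exact hxk c⟩

theorem foldl_pvDD (ks : List String) (acc : List String) :
    ks.foldl (fun acc key => if key ∈ acc then acc else acc ++ [key]) acc = acc ++ pvDD acc ks := by
  induction ks generalizing acc with
  | nil => simp [pvDD]
  | cons k ks ih =>
    simp only [List.foldl_cons, pvDD]
    by_cases hk : k ∈ acc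
    · rw [if_pos hk, if_pos hk, ih]
    · rw [if_neg hk, if_neg hk, ih (acc ++ [k]), List.append_assoc]
      rfl

theorem foldl_req (req ks : List String) (acc : List String) :
    ks.foldl (fun acc key => if key ∉ acc ∧ key ∉ req then acc ++ [key] else acc) acc
      = acc ++ pvDD (acc ++ req) ks := by
  induction ks generalizing acc with
  | nil => simp [pvDD]
  | cons k ks ih =>
    simp only [List.foldl_cons, pvDD]
    by_cases hk : k ∈ acc ++ req
    · rw [if_pos hk]
      rcases List.mem_append.1 hk with h | h
      · rw [if_neg (by intro c; exact c.1 h), ih]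
      · rw [if_neg (by intro c; exact c.2 h), ih]
    · have hka : k ∉ acc := fun c => hk (List.mem_append.2 (Or.inl c))
      have hkr : k ∉ req := fun c => hk (List.mem_append.2 (Or.inr c))
      rw [if_neg hk, if_pos ⟨hka, hkr⟩, ih (acc ++ [k]), List.append_assoc]
      have : pvDD (acc ++ [k] ++ req) ks = pvDD (acc ++ req ++ [k]) ks :=
        pvDD_congr ks (fun x => by simp only [List.mem_append, List.mem_singleton]; tauto)
      rw [this]
      rfl

theorem foldl_pair (ks : List String) :
    ∀ (seen : PySem.Set String) (acc s : List String), (∀ x, x ∈ seen ↔ x ∈ s) →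
    (ks.foldl
      (fun (st : PySem.Set String × List String) key =>
        if key ∈ st.1 then st else (PySem.Set.add st.1 key, st.2 ++ [key]))
      (seen, acc)).2 = acc ++ pvDD s ks := by
  induction ks with
  | nil => intro seen acc s _; simp [pvDD]
  | cons k ks ih =>
    intro seen acc s h
    simp only [List.foldl_cons, pvDD]
    by_cases hk : k ∈ seen
    · rw [if_pos hk, if_pos ((h k).1 hk)]
      exact ih seen acc s h
    · rw [if_neg hk, if_neg (fun c => hk ((h k).2 c))]
      rw [ih (PySem.Set.add seen k) (acc ++ [k]) (s ++ [k])
        (fun x => by rw [PySem.Set.mem_add]; simp only [List.mem_append, List.mem_singleton, h x])]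
      rw [List.append_assoc]
      rfl

theorem foldl_flat {α β γ : Type} (rows : List γ) (keysOf : γ → List β) (f : α → β → α) (init : α) :
    rows.foldl (fun a r => (keysOf r).foldl f a) init = (rows.flatMap keysOf).foldl f init := by
  induction rows generalizing init with
  | nil => rfl
  | cons r rows ih => simp [List.flatMap_cons, List.foldl_append, ih]

theorem pvDD_append (s l₁ l₂ : List String) :
    pvDD s (l₁ ++ l₂) = pvDD s l₁ ++ pvDD (s ++ pvDD s l₁) l₂ := by
  induction l₁ generalizing s with
  | nil => simp [pvDD]
  | cons k l₁ ih =>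
    simp only [List.cons_append, pvDD]
    by_cases hk : k ∈ s
    · rw [if_pos hk, if_pos hk, ih]
    · rw [if_neg hk, if_neg hk, ih (s ++ [k]), List.cons_append]
      have : pvDD (s ++ [k] ++ pvDD (s ++ [k]) l₁) l₂
          = pvDD (s ++ (k :: pvDD (s ++ [k]) l₁)) l₂ :=
        pvDD_congr l₂ (fun x => by simp only [List.mem_append, List.mem_cons]; tauto)
      rw [this]

theorem pvDD_filter (r : List String) (s ks : List String) :
    (pvDD s ks).filter (fun x => decide (x ∉ r)) = pvDD (s ++ r) ks := by
  induction ks generalizing s with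
  | nil => rfl
  | cons k ks ih =>
    simp only [pvDD]
    by_cases hs : k ∈ s
    · rw [if_pos hs, if_pos (List.mem_append.2 (Or.inl hs)), ih]
    · by_cases hr : k ∈ r
      · rw [if_neg hs, if_pos (List.mem_append.2 (Or.inr hr))]
        rw [List.filter_cons_of_neg (by simpa using hr), ih (s ++ [k])]
        refine pvDD_congr ks (fun x => ?_)
        simp only [List.mem_append, List.mem_cons, List.not_mem_nil, or_false]
        constructor
        · rintro ((h | rfl) | h) <;> tauto
        · tauto
      · rw [if_neg hs, if_neg (by simp [hs, hr])]
        rw [List.filter_cons_of_pos (by simpa using hr), ih (s ++ [k])]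
        congr 1
        exact pvDD_congr ks (fun x => by simp only [List.mem_append, List.mem_singleton]; tauto)

theorem pvDD_nodup (s ks : List String) : (pvDD s ks).Nodup := by
  induction ks generalizing s with
  | nil => exact List.nodup_nil
  | cons k ks ih =>
    simp only [pvDD]
    by_cases hk : k ∈ s
    · rw [if_pos hk]; exact ih s
    · rw [if_neg hk]
      refine List.Nodup.cons ?_ (ih (s ++ [k]))
      intro c
      exact (pvDD_mem.1 c).2 (List.mem_append.2 (Or.inr (List.mem_singleton.2 rfl)))

theorem erase_append_of_not_mem_right {x : String} (P Q : List String) (h : x ∉ Q) :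
    (P ++ Q).erase x = P.erase x ++ Q := by
  by_cases hp : x ∈ P
  · exact List.erase_append_left Q hp
  · rw [List.erase_of_not_mem hp, List.erase_of_not_mem (by simp [hp, h])]

-- A's final reordering pass on any list l: unconditionally "folder_name" :: "name" :: double-erase.
theorem final_phase (l : List String) :
    (["folder_name", "name"] : List String).reverse.foldl
      (fun acc key =>
        let acc := if key ∈ acc then acc.erase key else acc
        PySem.List.insert acc 0 key) l
    = "folder_name" :: "name" :: ((l.erase "name").erase "folder_name") := by
  have hfun : (fun (acc : List String) (key : String) =>
        let acc := if key ∈ acc then acc.erase key else acc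
        PySem.List.insert acc 0 key)
      = fun (acc : List String) (key : String) => key :: acc.erase key := by
    funext acc key
    by_cases hk : key ∈ acc
    · simp only [if_pos hk]
      simp [PySem.List.insert, PySem.List.sliceIndices]
    · simp only [if_neg hk]
      simp [PySem.List.insert, PySem.List.sliceIndices, List.erase_of_not_mem hk]
  rw [hfun]
  rw [show (["folder_name", "name"] : List String).reverse = ["name", "folder_name"] from rfl]
  simp only [List.foldl_cons, List.foldl_nil]
  rw [List.erase_cons]
  simp

theorem pvDD_not_mem {x : String} {s ks : List String} (h : x ∈ s) : x ∉ pvDD s ks :=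
  fun c => (pvDD_mem.1 c).2 h

theorem pvDD_empty_eq_nil_iff (ef : List String) : (pvDD [] ef = []) ↔ ef = [] := by
  cases ef <;> simp [pvDD]

-- set(xs) in first-insertion order IS dedup-against-nothing.
theorem ofList_eq_pvDD (xs : List String) : (PySem.Set.ofList xs : List String) = pvDD [] xs := by
  rw [PySem.Set.ofList_eq_foldl]
  have h : (PySem.Set.add : PySem.Set String → String → PySem.Set String)
      = fun s x => if x ∈ s then s else s ++ [x] := by
    funext s x; exact PySem.Set.add_eq_ite s x
  rw [h, foldl_pvDD]
  rfl

-- B's whole computation: dict.fromkeys over the prefixed stream.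
theorem alt_keys (src : List String) :
    PySem.Dict.keys
      (((["folder_name", "name"] : List String) ++ src).foldl
        (fun d key => PySem.Dict.insert d key ()) PySem.Dict.empty)
    = "folder_name" :: "name" :: pvDD ["folder_name", "name"] src := by
  rw [PySem.Dict.keys_foldl_insert]
  rw [show (PySem.Dict.empty : PySem.Dict String Unit).keys = [] from rfl]
  rw [PySem.Set.update_nil_left, ofList_eq_pvDD,
    pvDD_append ([] : List String) ["folder_name", "name"] src]
  rw [show pvDD [] ["folder_name", "name"] = ["folder_name", "name"] by decide]
  rfl

-- ===== VERDICT (by name: the statement is the Claim_ definition above) =====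
theorem build_fieldnames_spec : Claim_equal_build_fieldnames := by
  intro ef er nr nk _
  unfold Spec_build_fieldnames
  by_cases hef : ef = []
  · subst hef
    simp only [build_fieldnames, build_fieldnames_alt, List.foldl_nil, ne_eq,
      not_true_eq_false, if_false, if_true]
    rw [alt_keys]
    rw [foldl_flat]
    rw [foldl_pair ((er ++ nr).flatMap fun row => (PySem.Set.ofList (row.map Prod.fst) : List String))
        (PySem.Set.ofList ["folder_name", "name"]) [] ["folder_name", "name"]
        (fun x => PySem.Set.mem_ofList _ x)]
    simp only [List.nil_append]
    rw [final_phase,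
      List.erase_of_not_mem (pvDD_not_mem (by simp)),
      List.erase_of_not_mem (pvDD_not_mem (by simp))]
  · simp only [build_fieldnames, build_fieldnames_alt, ne_eq, hef,
      not_false_eq_true, if_true]
    rw [alt_keys]
    rw [foldl_pvDD ef []]
    simp only [List.nil_append]
    rw [if_neg (fun c => hef ((pvDD_empty_eq_nil_iff ef).1 c))]
    rw [foldl_req, final_phase]
    have hnmQ : "name" ∉ pvDD (pvDD [] ef ++ ["folder_name", "name"]) nk :=
      pvDD_not_mem (by simp)
    have hfnQ : "folder_name" ∉ pvDD (pvDD [] ef ++ ["folder_name", "name"]) nk :=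
      pvDD_not_mem (by simp)
    rw [erase_append_of_not_mem_right _ _ hnmQ, erase_append_of_not_mem_right _ _ hfnQ]
    have hP : (pvDD [] ef).Nodup := pvDD_nodup [] ef
    rw [List.Nodup.erase_eq_filter hP, List.Nodup.erase_eq_filter (hP.filter _),
      List.filter_filter]
    have hfil : (pvDD [] ef).filter (fun x => (x != "folder_name") && (x != "name"))
        = (pvDD [] ef).filter (fun x => decide (x ∉ (["folder_name", "name"] : List String))) := by
      refine List.filter_congr (fun x _ => ?_)
      by_cases h1 : x = "folder_name" <;> by_cases h2 : x = "name" <;> simp [h1, h2]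
    rw [hfil, pvDD_filter (["folder_name", "name"] : List String) [] ef]
    rw [pvDD_append (["folder_name", "name"] : List String) ef nk]
    have hQ : pvDD (pvDD [] ef ++ ["folder_name", "name"]) nk
        = pvDD (["folder_name", "name"] ++ pvDD (([] : List String) ++ ["folder_name", "name"]) ef) nk := by
      refine pvDD_congr nk (fun x => ?_)
      simp only [List.mem_append, pvDD_mem, List.not_mem_nil, not_false_eq_true, and_true,
        List.nil_append, List.mem_cons, or_false]
      tauto
    rw [hQ]
    rfl
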